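-- pv_equiv track=rewrite | github.com/YoonJunHyeok/PS | 프로그래머스/3/60063. 블록 이동하기/블록 이동하기.py | solution
-- ===== SOURCE A (Python) =====
-- from collections import deque
--
-- dx = [1, 0, -1, 0]
--
-- dy = [0, 1, 0, -1]
--
-- def OOM(n, x, y):
--     if x < 0 or x >= n or y < 0 or y >= n:
--         return True
--     return False
--
-- def solution(board):
--     N = len(board)
--     answer = 0
--
--     visited = [[[False]*4 for _ in range(N)] for _ in range(N)] # [x][y][dir] 별 방문 여부
--     q = deque()
--     q.append((0, 0, 1, 0)) # x, y, dir, time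
--     visited[0][0][1] = visited[0][1][3] = True
--
--     while q:
--         x1, y1, cur_dir, cur_time = q.popleft()
--         x2 = x1 + dx[cur_dir]
--         y2 = y1 + dy[cur_dir]
--
--         if (x1, y1) == (N - 1, N - 1) or (x2, y2) == (N - 1, N - 1):
--             answer = cur_time
--             break
--
--         # 상하좌우
--         for dir in range(4):
--             nx1, ny1 = x1 + dx[dir], y1 + dy[dir]
--             nx2, ny2 = x2 + dx[dir], y2 + dy[dir]
--
--             if OOM(N, nx1, ny1) or OOM(N, nx2, ny2):
--                 continue
--             if board[nx1][ny1] == 1 or board[nx2][ny2] == 1: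
--                 continue
--             if visited[nx1][ny1][cur_dir] or visited[nx2][ny2][(cur_dir + 2) % 4]:
--                 continue
--
--             q.append((nx1, ny1, cur_dir, cur_time + 1))
--             visited[nx1][ny1][cur_dir] = visited[nx2][ny2][(cur_dir + 2) % 4] = True
--
--         # 로봇의 현재 날개 기준 회전
--         for idx in [1, 3]:
--             dir = (cur_dir + idx) % 4
--             nx1, ny1 = x1, y1
--             nx2, ny2 = x1 + dx[dir], y1 + dy[dir]
--             rx, ry = x2 + dx[dir], y2 + dy[dir]
--
--             if OOM(N, nx2, ny2) or OOM(N, rx, ry):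
--                 continue
--             if board[nx2][ny2] == 1 or board[rx][ry] == 1:
--                 continue
--             if visited[nx1][ny1][dir] or visited[nx2][ny2][(dir + 2) % 4]:
--                 continue
--
--             q.append((nx1, ny1, dir, cur_time + 1))
--             visited[nx1][ny1][dir] = visited[nx2][ny2][(dir + 2) % 4] = True
--
--         # 로봇의 반대 날개 기준 회전
--         for idx in [1, 3]:
--             dir = (cur_dir + idx) % 4
--             nx1, ny1 = x2 + dx[dir], y2 + dy[dir]
--             nx2, ny2 = x2, y2
--             rx, ry = x1 + dx[dir], y1 + dy[dir]
--
--             if OOM(N, nx1, ny1) or OOM(N, rx, ry):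
--                 continue
--             if board[nx1][ny1] == 1 or board[rx][ry] == 1:
--                 continue
--             if visited[nx1][ny1][(dir + 2) % 4] or visited[nx2][ny2][dir]:
--                 continue
--
--             q.append((nx1, ny1, (dir + 2) % 4, cur_time + 1))
--             visited[nx1][ny1][(dir + 2) % 4] = visited[nx2][ny2][dir] = True
--
--     return answer
-- ===== SOURCE B (Python) =====
-- def solution(board):
--     n = len(board)
--
--     def free(c):
--         x, y = c
--         return 0 <= x < n and 0 <= y < n and board[x][y] != 1
--
--     def moves(s):
--         a, b = s
--         out = []
--         for e in ((1, 0), (0, 1), (-1, 0), (0, -1)):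
--             a2 = (a[0] + e[0], a[1] + e[1])
--             b2 = (b[0] + e[0], b[1] + e[1])
--             if free(a2) and free(b2):
--                 out.append((a2, b2) if a2 < b2 else (b2, a2))
--         for r in ((a[1] - b[1], b[0] - a[0]), (b[1] - a[1], a[0] - b[0])):
--             a2 = (a[0] + r[0], a[1] + r[1])
--             b2 = (b[0] + r[0], b[1] + r[1])
--             if free(a2) and free(b2):
--                 out.append((a, a2) if a < a2 else (a2, a))
--                 out.append((b, b2) if b < b2 else (b2, b))
--         return out
--
--     goal = (n - 1, n - 1)
--     reach = {((0, 0), (0, 1))}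
--     for t in range(2 * n * n + 1):
--         if any(goal in s for s in reach):
--             return t
--         bigger = reach | {m for s in reach for m in moves(s)}
--         if len(bigger) == len(reach):
--             break
--         reach = bigger
--     return 0
-- ===== Notes on version B (the rewrite author's own statement) =====
-- stated objective: alternative
-- what changed: B drops A's BFS machinery (deque, (x,y,dir)-encoded states, 3-D visited array, three inlined move loops) and instead iterates the reachable-set fixpoint R <- R | moves(R) over canonical sorted cell-pair states, returning the first round whose set contains a goal state; it trades BFS's O(V) frontier processing for whole-set re-expansion each round.
-- outside the precondition, e.g. on solution([[], [140, 10, 1]]): A returns 1, B raises IndexError; on solution([[0, 0], [0]]): A raises IndexError, B raises IndexError; on solution([[0]]): A raises IndexError, B returns 0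
import Mathlib
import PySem

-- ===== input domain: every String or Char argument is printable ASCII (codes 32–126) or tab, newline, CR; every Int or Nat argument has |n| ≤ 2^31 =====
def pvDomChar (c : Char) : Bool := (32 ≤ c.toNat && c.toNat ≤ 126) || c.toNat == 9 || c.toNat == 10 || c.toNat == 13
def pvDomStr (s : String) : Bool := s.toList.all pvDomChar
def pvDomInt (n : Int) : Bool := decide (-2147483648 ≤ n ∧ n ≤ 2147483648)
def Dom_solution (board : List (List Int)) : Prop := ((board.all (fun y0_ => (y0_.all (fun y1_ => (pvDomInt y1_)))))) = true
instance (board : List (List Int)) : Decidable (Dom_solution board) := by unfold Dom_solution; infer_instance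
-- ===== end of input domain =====

-- B replaces A's BFS (deque, (x,y,dir) states, 3-D visited array, three inlined move
-- loops) by round-by-round fixpoint iteration R ← R ∪ moves(R) over a set of canonical
-- cell-pair states, returning the first round containing a goal state; equal return
-- value, not faster (objective: alternative).

-- ===== PORT A =====
def pvDx : List Int := [1, 0, -1, 0]
def pvDy : List Int := [0, 1, 0, -1]
def pvDxAt (d : Int) : Int := (PySem.List.pyGet? pvDx d).getD 0
def pvDyAt (d : Int) : Int := (PySem.List.pyGet? pvDy d).getD 0
-- OOM(n, x, y)
def pvOOM (n x y : Int) : Bool := if x < 0 ∨ x ≥ n ∨ y < 0 ∨ y ≥ n then true else false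
-- board[x][y]; every access in A and B is made only after an in-bounds check, and under
-- Pre_ every row has length ≥ N, so the default 0 is never produced where Python raises
def pvCell (board : List (List Int)) (x y : Int) : Int :=
  (PySem.List.pyGet? ((PySem.List.pyGet? board x).getD []) y).getD 0
-- visited as a function (x, y, dir) → Bool; pvVisSet is the array assignment
def pvVisSet (v : Int → Int → Int → Bool) (x y d : Int) : Int → Int → Int → Bool :=
  fun a b c => if a = x ∧ b = y ∧ c = d then true else v a b c

-- the '상하좌우' loop body (for dir in range(4))
def pvStepTrans (board : List (List Int)) (N x1 y1 x2 y2 cd t : Int)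
    (s : List (Int × Int × Int × Int) × (Int → Int → Int → Bool)) (dir : Int) :
    List (Int × Int × Int × Int) × (Int → Int → Int → Bool) :=
  let nx1 := x1 + pvDxAt dir; let ny1 := y1 + pvDyAt dir
  let nx2 := x2 + pvDxAt dir; let ny2 := y2 + pvDyAt dir
  if pvOOM N nx1 ny1 || pvOOM N nx2 ny2 then s
  else if (pvCell board nx1 ny1 == 1) || (pvCell board nx2 ny2 == 1) then s
  else if s.2 nx1 ny1 cd || s.2 nx2 ny2 (PySem.Int.mod (cd + 2) 4) then s
  else (s.1 ++ [(nx1, ny1, cd, t + 1)],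
        pvVisSet (pvVisSet s.2 nx1 ny1 cd) nx2 ny2 (PySem.Int.mod (cd + 2) 4))

-- the first rotation loop (for idx in [1, 3], pivot (x1, y1))
def pvStepRotA (board : List (List Int)) (N x1 y1 x2 y2 cd t : Int)
    (s : List (Int × Int × Int × Int) × (Int → Int → Int → Bool)) (idx : Int) :
    List (Int × Int × Int × Int) × (Int → Int → Int → Bool) :=
  let dir := PySem.Int.mod (cd + idx) 4
  let nx2 := x1 + pvDxAt dir; let ny2 := y1 + pvDyAt dir
  let rx := x2 + pvDxAt dir; let ry := y2 + pvDyAt dir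
  if pvOOM N nx2 ny2 || pvOOM N rx ry then s
  else if (pvCell board nx2 ny2 == 1) || (pvCell board rx ry == 1) then s
  else if s.2 x1 y1 dir || s.2 nx2 ny2 (PySem.Int.mod (dir + 2) 4) then s
  else (s.1 ++ [(x1, y1, dir, t + 1)],
        pvVisSet (pvVisSet s.2 x1 y1 dir) nx2 ny2 (PySem.Int.mod (dir + 2) 4))

-- the second rotation loop (for idx in [1, 3], pivot (x2, y2))
def pvStepRotB (board : List (List Int)) (N x1 y1 x2 y2 cd t : Int)
    (s : List (Int × Int × Int × Int) × (Int → Int → Int → Bool)) (idx : Int) :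
    List (Int × Int × Int × Int) × (Int → Int → Int → Bool) :=
  let dir := PySem.Int.mod (cd + idx) 4
  let nx1 := x2 + pvDxAt dir; let ny1 := y2 + pvDyAt dir
  let rx := x1 + pvDxAt dir; let ry := y1 + pvDyAt dir
  if pvOOM N nx1 ny1 || pvOOM N rx ry then s
  else if (pvCell board nx1 ny1 == 1) || (pvCell board rx ry == 1) then s
  else if s.2 nx1 ny1 (PySem.Int.mod (dir + 2) 4) || s.2 x2 y2 dir then s
  else (s.1 ++ [(nx1, ny1, PySem.Int.mod (dir + 2) 4, t + 1)],
        pvVisSet (pvVisSet s.2 nx1 ny1 (PySem.Int.mod (dir + 2) 4)) x2 y2 dir)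

-- the while loop (fuel only makes the recursion structural; the fuel is large enough
-- for the BFS, which enqueues each of the ≤ 2·N·N block states once)
def pvLoopA (board : List (List Int)) (N : Int) :
    Nat → List (Int × Int × Int × Int) → (Int → Int → Int → Bool) → Int
  | 0, _, _ => 0
  | _ + 1, [], _ => 0
  | fuel + 1, (x1, y1, cd, t) :: rest, v =>
    let x2 := x1 + pvDxAt cd
    let y2 := y1 + pvDyAt cd
    if (x1 = N - 1 ∧ y1 = N - 1) ∨ (x2 = N - 1 ∧ y2 = N - 1) then t
    else
      let s1 := (PySem.List.pyRange 0 4 1).foldl (pvStepTrans board N x1 y1 x2 y2 cd t) (rest, v)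
      let s2 := ([1, 3] : List Int).foldl (pvStepRotA board N x1 y1 x2 y2 cd t) s1
      let s3 := ([1, 3] : List Int).foldl (pvStepRotB board N x1 y1 x2 y2 cd t) s2
      pvLoopA board N fuel s3.1 s3.2

def solution (board : List (List Int)) : Int :=
  let N : Int := board.length
  pvLoopA board N (4 * board.length * board.length + 4) [(0, 0, 1, 0)]
    (pvVisSet (pvVisSet (fun _ _ _ => false) 0 0 1) 0 1 3)

-- ===== PORT B =====
-- Python tuple '<' on coordinate pairs (lexicographic)
def pvLtP (a b : Int × Int) : Bool :=
  decide (a.1 < b.1) || (decide (a.1 = b.1) && decide (a.2 < b.2))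

def pvFreeC (board : List (List Int)) (n : Int) (c : Int × Int) : Bool :=
  decide (0 ≤ c.1 ∧ c.1 < n ∧ 0 ≤ c.2 ∧ c.2 < n) && !(pvCell board c.1 c.2 == 1)

-- moves(s): the legal next block states, each as a sorted (canonical) cell pair
def pvMoves (board : List (List Int)) (n : Int) (s : (Int × Int) × (Int × Int)) :
    List ((Int × Int) × (Int × Int)) :=
  let a := s.1
  let b := s.2
  let out := ([((1 : Int), (0 : Int)), (0, 1), (-1, 0), (0, -1)] : List (Int × Int)).foldl
    (fun out e =>
      let a2 := (a.1 + e.1, a.2 + e.2)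
      let b2 := (b.1 + e.1, b.2 + e.2)
      if pvFreeC board n a2 && pvFreeC board n b2 then
        out ++ [if pvLtP a2 b2 then (a2, b2) else (b2, a2)]
      else out) []
  ([(a.2 - b.2, b.1 - a.1), (b.2 - a.2, a.1 - b.1)] : List (Int × Int)).foldl
    (fun out r =>
      let a2 := (a.1 + r.1, a.2 + r.2)
      let b2 := (b.1 + r.1, b.2 + r.2)
      if pvFreeC board n a2 && pvFreeC board n b2 then
        out ++ [if pvLtP a a2 then (a, a2) else (a2, a), if pvLtP b b2 then (b, b2) else (b2, b)]
      else out) out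

-- for t in range(2*n*n+1): … (break → return 0)
def pvRoundsB (board : List (List Int)) (n : Int) (goal : Int × Int) :
    List Int → PySem.Set ((Int × Int) × (Int × Int)) → Int
  | [], _ => 0
  | t :: ts, reach =>
    if reach.any (fun s => s.1 == goal || s.2 == goal) then t
    else
      let bigger := PySem.Set.union reach (PySem.Set.ofList (reach.flatMap (pvMoves board n)))
      if bigger.length = reach.length then 0
      else pvRoundsB board n goal ts bigger

def solution_alt (board : List (List Int)) : Int :=
  let n : Int := board.length
  pvRoundsB board n (n - 1, n - 1) (PySem.List.pyRange 0 (2 * n * n + 1) 1)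
    (PySem.Set.add PySem.Set.empty ((0, 0), (0, 1)))

-- ===== PRECONDITION & SPEC =====
-- Pre_ excludes boards with fewer than 2 rows, on which A's initial marking raises
-- IndexError, and ragged boards with a row shorter than the number of rows, on which
-- cell accesses can raise IndexError (and A and B interleave bounds and cell checks
-- differently, so one may raise where the other happens to return); A returns
-- normally on everything admitted.
def Pre_solution (board : List (List Int)) : Prop :=
  2 ≤ board.length ∧ ∀ row ∈ board, board.length ≤ row.length
instance (board : List (List Int)) : Decidable (Pre_solution board) := by
  unfold Pre_solution; infer_instance
def pvWitness_solution : List (List Int) := [[0, 0], [0, 0]]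

def Spec_solution (board : List (List Int)) (out : Int) : Prop := out = solution_alt board
instance (board : List (List Int)) (out : Int) : Decidable (Spec_solution board out) := by
  unfold Spec_solution; infer_instance

-- ===== CLAIM (what is proved, stated in full; the proofs are below) =====
def Claim_equal_solution : Prop := ∀ (board : List (List Int)), Dom_solution board → Pre_solution board → Spec_solution board (solution board)

-- ===== LEMMAS AND PROOFS =====

-- A queue entry (x, y, d, t) denotes the block occupying cells (x, y) and (x, y) + v_d
def pvPairOf (x y d : Int) : (Int × Int) × (Int × Int) :=
  ((x, y), (x + pvDxAt d, y + pvDyAt d))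

-- the smaller-first representative of a cell pair (what B's sorting produces)
def pvCanon (p : (Int × Int) × (Int × Int)) : (Int × Int) × (Int × Int) :=
  if pvLtP p.1 p.2 then p else (p.2, p.1)

def pvFmap (e : Int × Int × Int × Int) : ((Int × Int) × (Int × Int)) × Int :=
  (pvPairOf e.1 e.2.1 e.2.2.1, e.2.2.2)

-- ghost BFS machine: queue of (cell-pair, time), visited list of canonical states
def pvNeighbors (board : List (List Int)) (n : Int) (c1 c2 : Int × Int) :
    List ((Int × Int) × (Int × Int)) :=
  let deltas : List (Int × Int) := [(1, 0), (0, 1), (-1, 0), (0, -1)]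
  let trans := deltas.filterMap (fun e =>
    if pvFreeC board n (c1.1 + e.1, c1.2 + e.2) && pvFreeC board n (c2.1 + e.1, c2.2 + e.2)
    then some ((c1.1 + e.1, c1.2 + e.2), (c2.1 + e.1, c2.2 + e.2)) else none)
  let ax := c2.1 - c1.1
  let ay := c2.2 - c1.2
  let perp : List (Int × Int) := [(-ay, ax), (ay, -ax)]
  let rot1 := perp.filterMap (fun r =>
    if pvFreeC board n (c1.1 + r.1, c1.2 + r.2) && pvFreeC board n (c2.1 + r.1, c2.2 + r.2)
    then some (c1, (c1.1 + r.1, c1.2 + r.2)) else none)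
  let rot2 := perp.filterMap (fun r =>
    if pvFreeC board n (c1.1 + r.1, c1.2 + r.2) && pvFreeC board n (c2.1 + r.1, c2.2 + r.2)
    then some ((c2.1 + r.1, c2.2 + r.2), c2) else none)
  trans ++ rot1 ++ rot2

def pvGhostStep (t : Int)
    (s : List (((Int × Int) × (Int × Int)) × Int) × List ((Int × Int) × (Int × Int)))
    (nb : (Int × Int) × (Int × Int)) :
    List (((Int × Int) × (Int × Int)) × Int) × List ((Int × Int) × (Int × Int)) :=
  if pvCanon nb ∈ s.2 then s
  else (s.1 ++ [(nb, t + 1)], s.2 ++ [pvCanon nb])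

def pvGhostLoop (board : List (List Int)) (n : Int) :
    Nat → List (((Int × Int) × (Int × Int)) × Int) → List ((Int × Int) × (Int × Int)) → Int
  | 0, _, _ => 0
  | _ + 1, [], _ => 0
  | fuel + 1, (c, t) :: rest, vis =>
    if c.1 = (n - 1, n - 1) ∨ c.2 = (n - 1, n - 1) then t
    else
      let s := (pvNeighbors board n c.1 c.2).foldl (pvGhostStep t) (rest, vis)
      pvGhostLoop board n fuel s.1 s.2

-- simulation invariant between A's (queue, visited array) and the ghost machine
def pvRel (sA : List (Int × Int × Int × Int) × (Int → Int → Int → Bool))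
    (sB : List (((Int × Int) × (Int × Int)) × Int) × List ((Int × Int) × (Int × Int))) : Prop :=
  sB.1 = sA.1.map pvFmap
  ∧ (∀ e ∈ sA.1, 0 ≤ e.2.2.1 ∧ e.2.2.1 < 4)
  ∧ (∀ x y d : Int, 0 ≤ d → d < 4 → (sA.2 x y d = true ↔ pvCanon (pvPairOf x y d) ∈ sB.2))

lemma pvDxAt_0 : pvDxAt 0 = 1 := by decide
lemma pvDxAt_1 : pvDxAt 1 = 0 := by decide
lemma pvDxAt_2 : pvDxAt 2 = -1 := by decide
lemma pvDxAt_3 : pvDxAt 3 = 0 := by decide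
lemma pvDyAt_0 : pvDyAt 0 = 0 := by decide
lemma pvDyAt_1 : pvDyAt 1 = 1 := by decide
lemma pvDyAt_2 : pvDyAt 2 = 0 := by decide
lemma pvDyAt_3 : pvDyAt 3 = -1 := by decide

lemma pvPairOf_inj {x y d x' y' d' : Int} (h1 : 0 ≤ d) (h2 : d < 4) (h3 : 0 ≤ d')
    (h4 : d' < 4) (h : pvPairOf x y d = pvPairOf x' y' d') : x = x' ∧ y = y' ∧ d = d' := by
  simp only [pvPairOf, Prod.mk.injEq] at h
  obtain ⟨⟨hx, hy⟩, hx2, hy2⟩ := h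
  subst hx; subst hy
  interval_cases d <;> interval_cases d' <;>
    simp_all [pvDxAt_0, pvDxAt_1, pvDxAt_2, pvDxAt_3, pvDyAt_0, pvDyAt_1, pvDyAt_2, pvDyAt_3]

lemma pvCanon_flip (p : (Int × Int) × (Int × Int)) : pvCanon (p.2, p.1) = pvCanon p := by
  obtain ⟨⟨a1, a2⟩, b1, b2⟩ := p
  simp only [pvCanon, pvLtP]
  split_ifs with h1 h2 h2 <;> simp_all <;> omega

lemma pvCanon_eq_iff (p q : (Int × Int) × (Int × Int)) :
    pvCanon p = pvCanon q ↔ (p = q ∨ p = (q.2, q.1)) := by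
  constructor
  · intro h
    simp only [pvCanon] at h
    split_ifs at h
    · left; exact h
    · right; rw [h]
    · right
      obtain ⟨p1, p2⟩ := p
      simp only at h
      rw [← h]
    · obtain ⟨p1, p2⟩ := p; obtain ⟨q1, q2⟩ := q
      simp only [Prod.mk.injEq] at h
      left; simp [h.1, h.2]
  · rintro (rfl | h)
    · rfl
    · rw [h, pvCanon_flip]

lemma pv_cand_sim (ex ey ed mx my md t : Int)
    (hed : 0 ≤ ed) (hed4 : ed < 4) (hmd : 0 ≤ md) (hmd4 : md < 4)
    (hm : pvPairOf mx my md = ((pvPairOf ex ey ed).2, (pvPairOf ex ey ed).1))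
    (sA : List (Int × Int × Int × Int) × (Int → Int → Int → Bool))
    (sB : List (((Int × Int) × (Int × Int)) × Int) × List ((Int × Int) × (Int × Int)))
    (hR : pvRel sA sB) :
    pvRel (if sA.2 ex ey ed || sA.2 mx my md then sA
           else (sA.1 ++ [(ex, ey, ed, t + 1)], pvVisSet (pvVisSet sA.2 ex ey ed) mx my md))
          (pvGhostStep t sB (pvPairOf ex ey ed)) := by
  obtain ⟨hq, hdirs, hmemo⟩ := hR
  have hmemE := hmemo ex ey ed hed hed4
  have hcflip : pvCanon (pvPairOf mx my md) = pvCanon (pvPairOf ex ey ed) := by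
    rw [hm, pvCanon_flip]
  have hmemM : sA.2 mx my md = true ↔ pvCanon (pvPairOf ex ey ed) ∈ sB.2 := by
    rw [hmemo mx my md hmd hmd4, hcflip]
  by_cases hIn : pvCanon (pvPairOf ex ey ed) ∈ sB.2
  · have hg : (sA.2 ex ey ed || sA.2 mx my md) = true := by
      rw [Bool.or_eq_true]; left; exact hmemE.mpr hIn
    rw [if_pos hg]
    unfold pvGhostStep
    rw [if_pos hIn]
    exact ⟨hq, hdirs, hmemo⟩
  · have hg : (sA.2 ex ey ed || sA.2 mx my md) = false := by
      rw [Bool.or_eq_false_iff]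
      constructor
      · rw [Bool.eq_false_iff, Ne, hmemE]; exact hIn
      · rw [Bool.eq_false_iff, Ne, hmemM]; exact hIn
    rw [if_neg (by simp [hg])]
    unfold pvGhostStep
    rw [if_neg hIn]
    refine ⟨?_, ?_, ?_⟩
    · simp only [List.map_append, ← hq, List.map_cons, List.map_nil]
      rfl
    · intro e he
      rcases List.mem_append.mp he with h | h
      · exact hdirs e h
      · simp at h; subst h; exact ⟨hed, hed4⟩
    · intro x y d hd hd4
      simp only [pvVisSet, List.mem_append, List.mem_singleton]
      have hkey : (pvCanon (pvPairOf x y d) = pvCanon (pvPairOf ex ey ed)) ↔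
          ((x = ex ∧ y = ey ∧ d = ed) ∨ (x = mx ∧ y = my ∧ d = md)) := by
        rw [pvCanon_eq_iff]
        constructor
        · rintro (h | h)
          · left; exact pvPairOf_inj hd hd4 hed hed4 h
          · right; exact pvPairOf_inj hd hd4 hmd hmd4 (by rw [h, ← hm])
        · rintro (⟨rfl, rfl, rfl⟩ | ⟨rfl, rfl, rfl⟩)
          · left; rfl
          · right; rw [hm]
      rw [hkey]
      split_ifs with h1 h2
      · simp [h1]
      · simp [h2]
      · rw [hmemo x y d hd hd4]
        simp [h1, h2]

lemma pvOOM_eq (N x y : Int) : pvOOM N x y = !decide (0 ≤ x ∧ x < N ∧ 0 ≤ y ∧ y < N) := by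
  simp only [pvOOM]
  split_ifs with h <;> simp <;> omega

lemma pv_bool_regroup (p q r s : Bool) :
    ((p && !q) && (r && !s)) = (!(!p || !r) && !(q || s)) := by
  cases p <;> cases q <;> cases r <;> cases s <;> rfl

lemma pv_bool_regroup' (p q r s : Bool) :
    ((p && !q) && (r && !s)) = (!(!r || !p) && !(s || q)) := by
  cases p <;> cases q <;> cases r <;> cases s <;> rfl

lemma pv_free_guard (board : List (List Int)) (N : Int) (a b : Int × Int) :
    (pvFreeC board N a && pvFreeC board N b) =
    (!(pvOOM N a.1 a.2 || pvOOM N b.1 b.2) &&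
     !((pvCell board a.1 a.2 == 1) || (pvCell board b.1 b.2 == 1))) := by
  simp only [pvFreeC, pvOOM_eq]
  exact pv_bool_regroup _ _ _ _

lemma pv_free_guard' (board : List (List Int)) (N : Int) (a b : Int × Int) :
    (pvFreeC board N a && pvFreeC board N b) =
    (!(pvOOM N b.1 b.2 || pvOOM N a.1 a.2) &&
     !((pvCell board b.1 b.2 == 1) || (pvCell board a.1 a.2 == 1))) := by
  simp only [pvFreeC, pvOOM_eq]
  exact pv_bool_regroup' _ _ _ _

lemma pv_mod_bounds (d k : Int) (h1 : 0 ≤ d) (h4 : d < 4) (hk : k = 1 ∨ k = 2 ∨ k = 3) :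
    0 ≤ PySem.Int.mod (d + k) 4 ∧ PySem.Int.mod (d + k) 4 < 4 := by
  rcases hk with rfl | rfl | rfl <;> interval_cases d <;> decide

lemma pvDxAt_flip (d : Int) (h1 : 0 ≤ d) (h4 : d < 4) :
    pvDxAt (PySem.Int.mod (d + 2) 4) = -pvDxAt d := by
  interval_cases d <;> decide

lemma pvDyAt_flip (d : Int) (h1 : 0 ≤ d) (h4 : d < 4) :
    pvDyAt (PySem.Int.mod (d + 2) 4) = -pvDyAt d := by
  interval_cases d <;> decide

lemma pv_foldl_sim {α : Type} (t : Int)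
    (F : List (Int × Int × Int × Int) × (Int → Int → Int → Bool) → α →
         List (Int × Int × Int × Int) × (Int → Int → Int → Bool))
    (h : α → Option ((Int × Int) × (Int × Int))) (l : List α) :
    ∀ (sA : List (Int × Int × Int × Int) × (Int → Int → Int → Bool))
      (sB : List (((Int × Int) × (Int × Int)) × Int) × List ((Int × Int) × (Int × Int))),
    pvRel sA sB →
    (∀ e ∈ l, ∀ sA' sB', pvRel sA' sB' →
        pvRel (F sA' e) (match h e with | some nb => pvGhostStep t sB' nb | none => sB')) →
    pvRel (l.foldl F sA) (List.foldl (pvGhostStep t) sB (l.filterMap h)) := by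
  induction l with
  | nil => intro sA sB hR _; exact hR
  | cons a l ih =>
    intro sA sB hR H
    have h1 := H a (List.mem_cons_self) sA sB hR
    rw [List.foldl_cons, List.filterMap_cons]
    cases hha : h a with
    | none =>
      rw [hha] at h1
      exact ih _ _ h1 (fun e he => H e (List.mem_cons_of_mem _ he))
    | some nb =>
      rw [hha] at h1
      rw [List.foldl_cons]
      exact ih _ _ h1 (fun e he => H e (List.mem_cons_of_mem _ he))

lemma pv_trans_elem (board : List (List Int)) (N x1 y1 cd t e : Int)
    (hcd1 : 0 ≤ cd) (hcd4 : cd < 4)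
    (sA' : List (Int × Int × Int × Int) × (Int → Int → Int → Bool))
    (sB' : List (((Int × Int) × (Int × Int)) × Int) × List ((Int × Int) × (Int × Int)))
    (hR' : pvRel sA' sB') :
    pvRel (pvStepTrans board N x1 y1 (x1 + pvDxAt cd) (y1 + pvDyAt cd) cd t sA' e)
      (match (if pvFreeC board N (x1 + pvDxAt e, y1 + pvDyAt e) &&
                 pvFreeC board N (x1 + pvDxAt cd + pvDxAt e, y1 + pvDyAt cd + pvDyAt e)
              then some ((x1 + pvDxAt e, y1 + pvDyAt e),
                         (x1 + pvDxAt cd + pvDxAt e, y1 + pvDyAt cd + pvDyAt e)) else none) with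
        | some nb => pvGhostStep t sB' nb
        | none => sB') := by
  simp only [pvStepTrans]
  rw [pv_free_guard]
  dsimp only
  cases hO : (pvOOM N (x1 + pvDxAt e) (y1 + pvDyAt e) ||
      pvOOM N (x1 + pvDxAt cd + pvDxAt e) (y1 + pvDyAt cd + pvDyAt e)) with
  | true => simpa using hR'
  | false =>
    cases hC : ((pvCell board (x1 + pvDxAt e) (y1 + pvDyAt e) == 1) ||
        (pvCell board (x1 + pvDxAt cd + pvDxAt e) (y1 + pvDyAt cd + pvDyAt e) == 1)) with
    | true => simpa using hR'
    | false =>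
      simp only [Bool.not_false, Bool.true_and, reduceIte]
      have hnb : ((x1 + pvDxAt e, y1 + pvDyAt e),
          (x1 + pvDxAt cd + pvDxAt e, y1 + pvDyAt cd + pvDyAt e)) =
          pvPairOf (x1 + pvDxAt e) (y1 + pvDyAt e) cd := by
        simp only [pvPairOf, Prod.mk.injEq]
        and_intros <;> first | trivial | ring
      rw [hnb]
      have hmb := pv_mod_bounds cd 2 hcd1 hcd4 (by norm_num)
      refine pv_cand_sim _ _ _ _ _ _ t hcd1 hcd4 hmb.1 hmb.2 ?_ sA' sB' hR'
      simp only [pvPairOf, Prod.mk.injEq, pvDxAt_flip cd hcd1 hcd4, pvDyAt_flip cd hcd1 hcd4]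
      and_intros <;> first | trivial | ring

lemma pv_rotA_elem (board : List (List Int)) (N x1 y1 cd t idx : Int)
    (hcd1 : 0 ≤ cd) (hcd4 : cd < 4) (hidx : idx = 1 ∨ idx = 3)
    (sA' : List (Int × Int × Int × Int) × (Int → Int → Int → Bool))
    (sB' : List (((Int × Int) × (Int × Int)) × Int) × List ((Int × Int) × (Int × Int)))
    (hR' : pvRel sA' sB') :
    pvRel (pvStepRotA board N x1 y1 (x1 + pvDxAt cd) (y1 + pvDyAt cd) cd t sA' idx)
      (match (if pvFreeC board N (x1 + pvDxAt (PySem.Int.mod (cd + idx) 4),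
                                 y1 + pvDyAt (PySem.Int.mod (cd + idx) 4)) &&
                 pvFreeC board N (x1 + pvDxAt cd + pvDxAt (PySem.Int.mod (cd + idx) 4),
                                 y1 + pvDyAt cd + pvDyAt (PySem.Int.mod (cd + idx) 4))
              then some ((x1, y1), (x1 + pvDxAt (PySem.Int.mod (cd + idx) 4),
                                    y1 + pvDyAt (PySem.Int.mod (cd + idx) 4))) else none) with
        | some nb => pvGhostStep t sB' nb
        | none => sB') := by
  have hdb := pv_mod_bounds cd idx hcd1 hcd4 (by rcases hidx with rfl | rfl <;> simp)
  simp only [pvStepRotA]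
  rw [pv_free_guard]
  dsimp only
  cases hO : (pvOOM N (x1 + pvDxAt (PySem.Int.mod (cd + idx) 4))
        (y1 + pvDyAt (PySem.Int.mod (cd + idx) 4)) ||
      pvOOM N (x1 + pvDxAt cd + pvDxAt (PySem.Int.mod (cd + idx) 4))
        (y1 + pvDyAt cd + pvDyAt (PySem.Int.mod (cd + idx) 4))) with
  | true => simpa using hR'
  | false =>
    cases hC : ((pvCell board (x1 + pvDxAt (PySem.Int.mod (cd + idx) 4))
          (y1 + pvDyAt (PySem.Int.mod (cd + idx) 4)) == 1) ||
        (pvCell board (x1 + pvDxAt cd + pvDxAt (PySem.Int.mod (cd + idx) 4))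
          (y1 + pvDyAt cd + pvDyAt (PySem.Int.mod (cd + idx) 4)) == 1)) with
    | true => simpa using hR'
    | false =>
      simp only [Bool.not_false, Bool.true_and, reduceIte]
      have hnb : (((x1, y1) : Int × Int), (x1 + pvDxAt (PySem.Int.mod (cd + idx) 4),
          y1 + pvDyAt (PySem.Int.mod (cd + idx) 4))) =
          pvPairOf x1 y1 (PySem.Int.mod (cd + idx) 4) := rfl
      rw [hnb]
      have hmb := pv_mod_bounds (PySem.Int.mod (cd + idx) 4) 2 hdb.1 hdb.2 (by norm_num)
      refine pv_cand_sim _ _ _ _ _ _ t hdb.1 hdb.2 hmb.1 hmb.2 ?_ sA' sB' hR'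
      simp only [pvPairOf, Prod.mk.injEq,
        pvDxAt_flip (PySem.Int.mod (cd + idx) 4) hdb.1 hdb.2,
        pvDyAt_flip (PySem.Int.mod (cd + idx) 4) hdb.1 hdb.2]
      and_intros <;> first | trivial | ring

lemma pv_rotB_elem (board : List (List Int)) (N x1 y1 cd t idx : Int)
    (hcd1 : 0 ≤ cd) (hcd4 : cd < 4) (hidx : idx = 1 ∨ idx = 3)
    (sA' : List (Int × Int × Int × Int) × (Int → Int → Int → Bool))
    (sB' : List (((Int × Int) × (Int × Int)) × Int) × List ((Int × Int) × (Int × Int)))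
    (hR' : pvRel sA' sB') :
    pvRel (pvStepRotB board N x1 y1 (x1 + pvDxAt cd) (y1 + pvDyAt cd) cd t sA' idx)
      (match (if pvFreeC board N (x1 + pvDxAt (PySem.Int.mod (cd + idx) 4),
                                 y1 + pvDyAt (PySem.Int.mod (cd + idx) 4)) &&
                 pvFreeC board N (x1 + pvDxAt cd + pvDxAt (PySem.Int.mod (cd + idx) 4),
                                 y1 + pvDyAt cd + pvDyAt (PySem.Int.mod (cd + idx) 4))
              then some ((x1 + pvDxAt cd + pvDxAt (PySem.Int.mod (cd + idx) 4),
                          y1 + pvDyAt cd + pvDyAt (PySem.Int.mod (cd + idx) 4)),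
                         (x1 + pvDxAt cd, y1 + pvDyAt cd)) else none) with
        | some nb => pvGhostStep t sB' nb
        | none => sB') := by
  have hdb := pv_mod_bounds cd idx hcd1 hcd4 (by rcases hidx with rfl | rfl <;> simp)
  simp only [pvStepRotB]
  rw [pv_free_guard']
  dsimp only
  cases hO : (pvOOM N (x1 + pvDxAt cd + pvDxAt (PySem.Int.mod (cd + idx) 4))
        (y1 + pvDyAt cd + pvDyAt (PySem.Int.mod (cd + idx) 4)) ||
      pvOOM N (x1 + pvDxAt (PySem.Int.mod (cd + idx) 4))
        (y1 + pvDyAt (PySem.Int.mod (cd + idx) 4))) with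
  | true => simpa using hR'
  | false =>
    cases hC : ((pvCell board (x1 + pvDxAt cd + pvDxAt (PySem.Int.mod (cd + idx) 4))
          (y1 + pvDyAt cd + pvDyAt (PySem.Int.mod (cd + idx) 4)) == 1) ||
        (pvCell board (x1 + pvDxAt (PySem.Int.mod (cd + idx) 4))
          (y1 + pvDyAt (PySem.Int.mod (cd + idx) 4)) == 1)) with
    | true => simpa using hR'
    | false =>
      simp only [Bool.not_false, Bool.true_and, reduceIte]
      have hmb := pv_mod_bounds (PySem.Int.mod (cd + idx) 4) 2 hdb.1 hdb.2 (by norm_num)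
      have hnb : ((x1 + pvDxAt cd + pvDxAt (PySem.Int.mod (cd + idx) 4),
          y1 + pvDyAt cd + pvDyAt (PySem.Int.mod (cd + idx) 4)),
          ((x1 + pvDxAt cd, y1 + pvDyAt cd) : Int × Int)) =
          pvPairOf (x1 + pvDxAt cd + pvDxAt (PySem.Int.mod (cd + idx) 4))
            (y1 + pvDyAt cd + pvDyAt (PySem.Int.mod (cd + idx) 4))
            (PySem.Int.mod (PySem.Int.mod (cd + idx) 4 + 2) 4) := by
        simp only [pvPairOf, Prod.mk.injEq,
          pvDxAt_flip (PySem.Int.mod (cd + idx) 4) hdb.1 hdb.2,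
          pvDyAt_flip (PySem.Int.mod (cd + idx) 4) hdb.1 hdb.2]
        and_intros <;> first | trivial | ring
      rw [hnb]
      refine pv_cand_sim _ _ _ _ _ _ t hmb.1 hmb.2 hdb.1 hdb.2 ?_ sA' sB' hR'
      simp only [pvPairOf, Prod.mk.injEq,
        pvDxAt_flip (PySem.Int.mod (cd + idx) 4) hdb.1 hdb.2,
        pvDyAt_flip (PySem.Int.mod (cd + idx) 4) hdb.1 hdb.2]
      and_intros <;> first | trivial | ring

lemma pv_node_sim (board : List (List Int)) (N x1 y1 cd t : Int)
    (rest : List (Int × Int × Int × Int)) (v : Int → Int → Int → Bool)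
    (qB : List (((Int × Int) × (Int × Int)) × Int)) (S : List ((Int × Int) × (Int × Int)))
    (hcd1 : 0 ≤ cd) (hcd4 : cd < 4) (hR : pvRel (rest, v) (qB, S)) :
    pvRel (([1, 3] : List Int).foldl
             (pvStepRotB board N x1 y1 (x1 + pvDxAt cd) (y1 + pvDyAt cd) cd t)
             (([1, 3] : List Int).foldl
               (pvStepRotA board N x1 y1 (x1 + pvDxAt cd) (y1 + pvDyAt cd) cd t)
               ((PySem.List.pyRange 0 4 1).foldl
                 (pvStepTrans board N x1 y1 (x1 + pvDxAt cd) (y1 + pvDyAt cd) cd t) (rest, v))))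
          ((pvNeighbors board N (x1, y1) (x1 + pvDxAt cd, y1 + pvDyAt cd)).foldl
             (pvGhostStep t) (qB, S)) := by
  have hrange : PySem.List.pyRange 0 4 1 = ([0, 1, 2, 3] : List Int) := by decide
  have hdeltas : ([((1 : Int), (0 : Int)), (0, 1), (-1, 0), (0, -1)] : List (Int × Int)) =
      ([0, 1, 2, 3] : List Int).map (fun d => (pvDxAt d, pvDyAt d)) := by decide
  have hax : (x1 + pvDxAt cd) - x1 = pvDxAt cd := by ring
  have hay : (y1 + pvDyAt cd) - y1 = pvDyAt cd := by ring
  have hperp : ([(-(pvDyAt cd), pvDxAt cd), (pvDyAt cd, -(pvDxAt cd))] : List (Int × Int)) =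
      ([1, 3] : List Int).map (fun idx =>
        (pvDxAt (PySem.Int.mod (cd + idx) 4), pvDyAt (PySem.Int.mod (cd + idx) 4))) := by
    interval_cases cd <;> decide
  simp only [pvNeighbors, hax, hay, hdeltas, hperp, hrange, List.filterMap_map,
    List.foldl_append]
  refine pv_foldl_sim t _ _ _ _ _
    (pv_foldl_sim t _ _ _ _ _
      (pv_foldl_sim t _ _ _ _ _ hR ?_) ?_) ?_
  · intro e he sA' sB' hR'
    exact pv_trans_elem board N x1 y1 cd t e hcd1 hcd4 sA' sB' hR'
  · intro idx hidx sA' sB' hR'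
    have h13 : idx = 1 ∨ idx = 3 := by simpa using hidx
    exact pv_rotA_elem board N x1 y1 cd t idx hcd1 hcd4 h13 sA' sB' hR'
  · intro idx hidx sA' sB' hR'
    have h13 : idx = 1 ∨ idx = 3 := by simpa using hidx
    exact pv_rotB_elem board N x1 y1 cd t idx hcd1 hcd4 h13 sA' sB' hR'

lemma pv_loop_sim (board : List (List Int)) (N : Int) (fuel : Nat) :
    ∀ (qA : List (Int × Int × Int × Int)) (v : Int → Int → Int → Bool)
      (qB : List (((Int × Int) × (Int × Int)) × Int)) (S : List ((Int × Int) × (Int × Int))),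
    pvRel (qA, v) (qB, S) →
    pvLoopA board N fuel qA v = pvGhostLoop board N fuel qB S := by
  induction fuel with
  | zero => intro qA v qB S hR; rfl
  | succ fuel ih =>
    intro qA v qB S hR
    obtain ⟨hq, hdirs, hmemo⟩ := hR
    cases qA with
    | nil =>
      simp only [List.map_nil] at hq; subst hq; rfl
    | cons a rest =>
      obtain ⟨x1, y1, cd, t⟩ := a
      simp only [List.map_cons] at hq
      subst hq
      obtain ⟨hcd1, hcd4⟩ := hdirs (x1, y1, cd, t) List.mem_cons_self
      simp only [pvLoopA, pvGhostLoop, pvFmap, pvPairOf]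
      have hiff : ((x1 = N - 1 ∧ y1 = N - 1) ∨
          (x1 + pvDxAt cd = N - 1 ∧ y1 + pvDyAt cd = N - 1)) ↔
          ((x1, y1) = (N - 1, N - 1) ∨
           (x1 + pvDxAt cd, y1 + pvDyAt cd) = (N - 1, N - 1)) := by
        simp [Prod.ext_iff]
      rw [if_congr hiff rfl rfl]
      split_ifs with hgoal
      · rfl
      · have hnode := pv_node_sim board N x1 y1 cd t rest v (rest.map pvFmap) S hcd1 hcd4
          ⟨rfl, fun e he => hdirs e (List.mem_cons_of_mem _ he),
           fun x y d hd hd4 => hmemo x y d hd hd4⟩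
        exact ih _ _ _ _ (by simpa using hnode)

-- Part I conclusion: A equals the ghost machine
lemma pv_A_eq_ghost (board : List (List Int)) :
    solution board = pvGhostLoop board board.length (4 * board.length * board.length + 4)
      [(((0, 0), (0, 1)), 0)] [((0, 0), (0, 1))] := by
  unfold solution
  apply pv_loop_sim
  refine ⟨by decide, ?_, ?_⟩
  · intro e he; simp at he; subst he; constructor <;> decide
  · intro x y d hd hd4
    simp only [List.mem_singleton, pvVisSet]
    have hp1 : pvCanon (pvPairOf 0 0 1) = (((0, 0), (0, 1)) : (Int × Int) × (Int × Int)) := by decide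
    have hp2 : pvCanon (pvPairOf 0 1 3) = (((0, 0), (0, 1)) : (Int × Int) × (Int × Int)) := by decide
    constructor
    · intro h
      split_ifs at h with h1 h2
      · obtain ⟨rfl, rfl, rfl⟩ := h1
        exact hp1.symm ▸ rfl
      · obtain ⟨rfl, rfl, rfl⟩ := h2
        exact hp2.symm ▸ rfl
    · intro h
      have := (pvCanon_eq_iff (pvPairOf x y d) (pvPairOf 0 0 1)).mp (by rw [hp1, h])
      rcases this with heq | heq
      · obtain ⟨rfl, rfl, rfl⟩ := pvPairOf_inj hd hd4 (by norm_num) (by norm_num) heq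
        simp
      · have heq' : pvPairOf x y d = pvPairOf 0 1 3 := by
          rw [heq]; decide
        obtain ⟨rfl, rfl, rfl⟩ := pvPairOf_inj hd hd4 (by norm_num) (by norm_num) heq'
        simp


-- ===== common spec: bounded reachability of canonical block states =====

def pvReachSet (board : List (List Int)) (n : Int) : Nat → Finset ((Int × Int) × (Int × Int))
  | 0 => {((0, 0), (0, 1))}
  | k + 1 => pvReachSet board n k ∪
      (pvReachSet board n k).biUnion (fun u => (pvMoves board n u).toFinset)

def pvGoalB (board : List (List Int)) (n : Int) (t : Nat) : Bool :=
  decide (∃ c ∈ pvReachSet board n t, c.1 = (n - 1, n - 1) ∨ c.2 = (n - 1, n - 1))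

noncomputable def pvAns (board : List (List Int)) (n : Int) : Int :=
  @dite _ (∃ t, pvGoalB board n t = true) (Classical.propDecidable _)
    (fun h => ((Nat.find h : Nat) : Int)) (fun _ => 0)

lemma pv_reach_subset_succ (board : List (List Int)) (n : Int) (t : Nat) :
    pvReachSet board n t ⊆ pvReachSet board n (t + 1) := by
  intro x hx
  simp only [pvReachSet, Finset.mem_union]
  exact Or.inl hx

lemma pv_reach_mono (board : List (List Int)) (n : Int) {t t' : Nat} (h : t ≤ t') :
    pvReachSet board n t ⊆ pvReachSet board n t' := by
  induction t' with
  | zero => simp_all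
  | succ k ih =>
    rcases Nat.lt_or_ge t (k + 1) with hlt | hge
    · exact fun x hx => pv_reach_subset_succ board n k (ih (by omega) hx)
    · have : t = k + 1 := by omega
      subst this; exact fun x hx => hx

lemma pv_mem_reach_succ (board : List (List Int)) (n : Int) (t : Nat)
    (x : (Int × Int) × (Int × Int)) :
    x ∈ pvReachSet board n (t + 1) ↔
      x ∈ pvReachSet board n t ∨ ∃ u ∈ pvReachSet board n t, x ∈ pvMoves board n u := by
  simp [pvReachSet, Finset.mem_union, Finset.mem_biUnion, List.mem_toFinset]

lemma pv_reach_stab (board : List (List Int)) (n : Int) (t : Nat)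
    (h : pvReachSet board n (t + 1) = pvReachSet board n t) :
    ∀ k, t ≤ k → pvReachSet board n k = pvReachSet board n t := by
  intro k hk
  induction k with
  | zero => have : t = 0 := by omega
            subst this; rfl
  | succ m ih =>
    rcases Nat.lt_or_ge t (m + 1) with hlt | hge
    · have hm := ih (by omega)
      ext x
      rw [pv_mem_reach_succ]
      constructor
      · rintro (hx | ⟨u, hu, hm'⟩)
        · rw [← hm]; exact hx
        · rw [← h, pv_mem_reach_succ]
          right; exact ⟨u, by rw [← hm]; exact hu, hm'⟩
      · intro hx; left; rw [hm]; exact hx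
    · have : t = m + 1 := by omega
      subst this; rfl

-- explicit form of pvMoves as a flatMap over the 4 translations and 2 rotation vectors
lemma pv_moves_eq (board : List (List Int)) (n : Int) (a b : Int × Int) :
    pvMoves board n (a, b) =
      (([((1 : Int), (0 : Int)), (0, 1), (-1, 0), (0, -1)] : List (Int × Int)).flatMap
        (fun e =>
          if pvFreeC board n (a.1 + e.1, a.2 + e.2) && pvFreeC board n (b.1 + e.1, b.2 + e.2)
          then [pvCanon ((a.1 + e.1, a.2 + e.2), (b.1 + e.1, b.2 + e.2))] else [])) ++
      (([(a.2 - b.2, b.1 - a.1), (b.2 - a.2, a.1 - b.1)] : List (Int × Int)).flatMap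
        (fun r =>
          if pvFreeC board n (a.1 + r.1, a.2 + r.2) && pvFreeC board n (b.1 + r.1, b.2 + r.2)
          then [pvCanon (a, (a.1 + r.1, a.2 + r.2)), pvCanon (b, (b.1 + r.1, b.2 + r.2))]
          else [])) := by
  simp only [pvMoves]
  have hf1 : (fun (out : List ((Int × Int) × (Int × Int))) (e : Int × Int) =>
      if pvFreeC board n (a.1 + e.1, a.2 + e.2) && pvFreeC board n (b.1 + e.1, b.2 + e.2) then
        out ++ [if pvLtP (a.1 + e.1, a.2 + e.2) (b.1 + e.1, b.2 + e.2) then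
                  ((a.1 + e.1, a.2 + e.2), (b.1 + e.1, b.2 + e.2))
                else ((b.1 + e.1, b.2 + e.2), (a.1 + e.1, a.2 + e.2))]
      else out) =
      (fun out e => out ++
        (if pvFreeC board n (a.1 + e.1, a.2 + e.2) && pvFreeC board n (b.1 + e.1, b.2 + e.2)
         then [pvCanon ((a.1 + e.1, a.2 + e.2), (b.1 + e.1, b.2 + e.2))] else [])) := by
    funext out e
    simp only [pvCanon]
    split <;> simp
  have hf2 : (fun (out : List ((Int × Int) × (Int × Int))) (r : Int × Int) =>
      if pvFreeC board n (a.1 + r.1, a.2 + r.2) && pvFreeC board n (b.1 + r.1, b.2 + r.2) then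
        out ++ [if pvLtP a (a.1 + r.1, a.2 + r.2) then (a, (a.1 + r.1, a.2 + r.2))
                else ((a.1 + r.1, a.2 + r.2), a),
                if pvLtP b (b.1 + r.1, b.2 + r.2) then (b, (b.1 + r.1, b.2 + r.2))
                else ((b.1 + r.1, b.2 + r.2), b)]
      else out) =
      (fun out r => out ++
        (if pvFreeC board n (a.1 + r.1, a.2 + r.2) && pvFreeC board n (b.1 + r.1, b.2 + r.2)
         then [pvCanon (a, (a.1 + r.1, a.2 + r.2)), pvCanon (b, (b.1 + r.1, b.2 + r.2))]
         else [])) := by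
    funext out r
    simp only [pvCanon]
    split <;> simp
  rw [hf1, hf2, PySem.List.foldl_append_eq_flatMap, PySem.List.foldl_append_eq_flatMap]
  simp

-- ===== geometry: reached states are canonical in-board dominoes =====

def pvInB (n : Int) (c : Int × Int) : Prop := 0 ≤ c.1 ∧ c.1 < n ∧ 0 ≤ c.2 ∧ c.2 < n

def pvShape (s : (Int × Int) × (Int × Int)) : Prop :=
  s.2 = (s.1.1, s.1.2 + 1) ∨ s.2 = (s.1.1 + 1, s.1.2)

def pvOk (n : Int) (s : (Int × Int) × (Int × Int)) : Prop :=
  pvInB n s.1 ∧ pvInB n s.2 ∧ pvShape s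

lemma pv_free_inB (board : List (List Int)) (n : Int) (c : Int × Int)
    (h : pvFreeC board n c = true) : pvInB n c := by
  simp only [pvFreeC, Bool.and_eq_true, decide_eq_true_eq] at h
  exact h.1

lemma pvCanon_keep (p : (Int × Int) × (Int × Int)) (h : pvLtP p.1 p.2 = true) :
    pvCanon p = p := by simp [pvCanon, h]

lemma pvCanon_swap (p : (Int × Int) × (Int × Int)) (h : pvLtP p.1 p.2 = false) :
    pvCanon p = (p.2, p.1) := by simp [pvCanon, h]

lemma pv_canon_ok (n : Int) (p : (Int × Int) × (Int × Int))
    (h1 : pvInB n p.1) (h2 : pvInB n p.2)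
    (hd : p.2 = (p.1.1, p.1.2 + 1) ∨ p.2 = (p.1.1 + 1, p.1.2) ∨
          p.2 = (p.1.1, p.1.2 - 1) ∨ p.2 = (p.1.1 - 1, p.1.2)) : pvOk n (pvCanon p) := by
  obtain ⟨⟨px, py⟩, qx, qy⟩ := p
  simp only at h1 h2 hd
  rcases hd with h | h | h | h <;> obtain ⟨hx, hy⟩ := Prod.mk.injEq .. ▸ (by exact h : (qx, qy) = _) <;> subst hx <;> subst hy
  · rw [pvCanon_keep _ (by simp [pvLtP])]
    exact ⟨h1, h2, Or.inl rfl⟩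
  · rw [pvCanon_keep _ (by simp [pvLtP])]
    exact ⟨h1, h2, Or.inr rfl⟩
  · rw [pvCanon_swap _ (by simp [pvLtP]; try omega)]
    refine ⟨h2, h1, Or.inl ?_⟩
    simp
  · rw [pvCanon_swap _ (by simp [pvLtP]; try omega)]
    refine ⟨h2, h1, Or.inr ?_⟩
    simp

lemma pv_moves_ok (board : List (List Int)) (n : Int) (a b : Int × Int)
    (hok : pvOk n (a, b)) : ∀ m ∈ pvMoves board n (a, b), pvOk n m := by
  obtain ⟨hina, hinb, hsh⟩ := hok
  simp only at hina hinb
  intro m hm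
  rw [pv_moves_eq] at hm
  rcases List.mem_append.mp hm with hm | hm <;> rw [List.mem_flatMap] at hm <;>
    obtain ⟨e, he, hme⟩ := hm <;> split_ifs at hme with hg <;>
    try exact absurd hme (List.not_mem_nil)
  · -- translations
    simp only [List.mem_singleton] at hme
    subst hme
    simp only [Bool.and_eq_true] at hg
    obtain ⟨hg1, hg2⟩ := hg
    refine pv_canon_ok n _ (pv_free_inB board n _ hg1) (pv_free_inB board n _ hg2) ?_
    rcases hsh with hv | hv <;> rw [show b = _ from hv] <;> simp <;> omega
  · -- rotations
    simp only [List.mem_cons, List.not_mem_nil, or_false] at hme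
    simp only [Bool.and_eq_true] at hg
    obtain ⟨hg1, hg2⟩ := hg
    have hr : e = (a.2 - b.2, b.1 - a.1) ∨ e = (b.2 - a.2, a.1 - b.1) := by
      simpa using he
    have hunit : e = ((1 : Int), (0 : Int)) ∨ e = (-1, 0) ∨ e = (0, 1) ∨ e = (0, -1) := by
      rcases hsh with hv | hv <;> rw [show b = _ from hv] at hr <;> rcases hr with rfl | rfl <;>
        simp
    rcases hme with rfl | rfl
    · refine pv_canon_ok n _ hina (pv_free_inB board n _ hg1) ?_
      rcases hunit with rfl | rfl | rfl | rfl <;> simp <;> omega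
    · refine pv_canon_ok n _ hinb (pv_free_inB board n _ hg2) ?_
      rcases hunit with rfl | rfl | rfl | rfl <;> simp <;> omega

lemma pv_reach_ok (board : List (List Int)) (n : Int) (hn : 2 ≤ n) (t : Nat) :
    ∀ s ∈ pvReachSet board n t, pvOk n s := by
  induction t with
  | zero =>
    intro s hs
    simp only [pvReachSet, Finset.mem_singleton] at hs
    subst hs
    refine ⟨?_, ?_, ?_⟩ <;> simp [pvInB, pvShape] <;> omega
  | succ k ih =>
    intro s hs
    rw [pv_mem_reach_succ] at hs
    rcases hs with hs | ⟨u, hu, hm⟩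
    · exact ih s hs
    · have := ih u hu
      exact pv_moves_ok board n u.1 u.2 (by simpa using this) s (by simpa using hm)

noncomputable def pvBoxFin (n : Int) : Finset ((Int × Int) × (Int × Int)) :=
  ((Finset.Icc (0 : ℤ) (n - 1)) ×ˢ (Finset.Icc (0 : ℤ) (n - 1))).image
      (fun c => (c, (c.1, c.2 + 1))) ∪
  ((Finset.Icc (0 : ℤ) (n - 1)) ×ˢ (Finset.Icc (0 : ℤ) (n - 1))).image
      (fun c => (c, (c.1 + 1, c.2)))

lemma pv_ok_mem_box (n : Int) (s : (Int × Int) × (Int × Int)) (h : pvOk n s) :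
    s ∈ pvBoxFin n := by
  obtain ⟨⟨h1, h2, h3, h4⟩, _, hsh⟩ := h
  simp only [pvBoxFin, Finset.mem_union, Finset.mem_image, Finset.mem_product, Finset.mem_Icc]
  rcases hsh with hv | hv
  · left; exact ⟨s.1, ⟨⟨h1, by omega⟩, ⟨h3, by omega⟩⟩, by rw [← hv]⟩
  · right; exact ⟨s.1, ⟨⟨h1, by omega⟩, ⟨h3, by omega⟩⟩, by rw [← hv]⟩

lemma pv_box_card (n : Int) : (pvBoxFin n).card ≤ 2 * (n.toNat * n.toNat) := by
  have hc : ((Finset.Icc (0 : ℤ) (n - 1)) ×ˢ (Finset.Icc (0 : ℤ) (n - 1))).card =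
      n.toNat * n.toNat := by
    rw [Finset.card_product, Int.card_Icc]
    simp
  calc (pvBoxFin n).card ≤ _ + _ := Finset.card_union_le _ _
    _ ≤ n.toNat * n.toNat + n.toNat * n.toNat := by
        gcongr <;> exact le_trans (Finset.card_image_le) (le_of_eq hc)
    _ = 2 * (n.toNat * n.toNat) := by ring

lemma pv_reach_card_le (board : List (List Int)) (n : Int) (hn : 2 ≤ n) (t : Nat) :
    (pvReachSet board n t).card ≤ 2 * (n.toNat * n.toNat) := by
  refine le_trans (Finset.card_le_card ?_) (pv_box_card n)
  intro s hs
  exact pv_ok_mem_box n s (pv_reach_ok board n hn t s hs)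

lemma pv_find_le (board : List (List Int)) (n : Int) (hn : 2 ≤ n)
    (h : ∃ t, pvGoalB board n t = true) :
    Nat.find h ≤ 2 * (n.toNat * n.toNat) := by
  set K := Nat.find h with hK
  have hgrow : ∀ t, t ≤ K → t + 1 ≤ (pvReachSet board n t).card := by
    intro t ht
    induction t with
    | zero => simp [pvReachSet]
    | succ m ih =>
      have hm := ih (by omega)
      have hne : pvReachSet board n (m + 1) ≠ pvReachSet board n m := by
        intro heq
        have hstab := pv_reach_stab board n m heq
        have hGK : pvGoalB board n K = true := Nat.find_spec h
        have : pvGoalB board n m = true := by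
          simp only [pvGoalB, decide_eq_true_eq] at hGK ⊢
          obtain ⟨c, hc, hg⟩ := hGK
          rw [hstab K (by omega)] at hc
          exact ⟨c, hc, hg⟩
        have := Nat.find_min h (m := m) (by omega)
        exact this ‹_›
      have hss : pvReachSet board n m ⊂ pvReachSet board n (m + 1) :=
        ⟨pv_reach_subset_succ board n m, fun hsub => hne (Finset.Subset.antisymm
          (fun x hx => hsub hx) (pv_reach_subset_succ board n m))⟩
      have := Finset.card_lt_card hss
      omega
  have := hgrow K (le_refl K)
  have := pv_reach_card_le board n hn K
  omega

-- ===== bridges: pvMoves is flip-invariant and is the canonical image of pvNeighbors =====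

lemma pv_mem_moves_iff (board : List (List Int)) (n : Int) (a b : Int × Int)
    (m : (Int × Int) × (Int × Int)) :
    m ∈ pvMoves board n (a, b) ↔
      (∃ e ∈ ([((1 : Int), (0 : Int)), (0, 1), (-1, 0), (0, -1)] : List (Int × Int)),
        (pvFreeC board n (a.1 + e.1, a.2 + e.2) && pvFreeC board n (b.1 + e.1, b.2 + e.2)) = true ∧
        m = pvCanon ((a.1 + e.1, a.2 + e.2), (b.1 + e.1, b.2 + e.2))) ∨
      (∃ r ∈ ([(a.2 - b.2, b.1 - a.1), (b.2 - a.2, a.1 - b.1)] : List (Int × Int)),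
        (pvFreeC board n (a.1 + r.1, a.2 + r.2) && pvFreeC board n (b.1 + r.1, b.2 + r.2)) = true ∧
        (m = pvCanon (a, (a.1 + r.1, a.2 + r.2)) ∨ m = pvCanon (b, (b.1 + r.1, b.2 + r.2)))) := by
  rw [pv_moves_eq]
  rw [List.mem_append]
  constructor
  · rintro (hm | hm) <;> rw [List.mem_flatMap] at hm <;> obtain ⟨e, he, hme⟩ := hm <;>
      split_ifs at hme with hg <;> try exact absurd hme (List.not_mem_nil)
    · left
      simp only [List.mem_singleton] at hme
      exact ⟨e, he, hg, hme⟩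
    · right
      simp only [List.mem_cons, List.not_mem_nil, or_false] at hme
      exact ⟨e, he, hg, hme⟩
  · rintro (⟨e, he, hg, rfl⟩ | ⟨r, hr, hg, hm⟩)
    · left
      rw [List.mem_flatMap]
      exact ⟨e, he, by rw [if_pos hg]; simp⟩
    · right
      rw [List.mem_flatMap]
      refine ⟨r, hr, by rw [if_pos hg]; rcases hm with rfl | rfl <;> simp⟩

lemma pv_moves_flip (board : List (List Int)) (n : Int) (a b : Int × Int)
    (m : (Int × Int) × (Int × Int)) :
    m ∈ pvMoves board n (b, a) ↔ m ∈ pvMoves board n (a, b) := by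
  rw [pv_mem_moves_iff, pv_mem_moves_iff]
  simp only [List.mem_cons, List.not_mem_nil, or_false]
  constructor
  · rintro (⟨e, he, hg, rfl⟩ | ⟨r, hr, hg, hm⟩)
    · exact Or.inl ⟨e, he, by rw [Bool.and_comm]; exact hg,
        pvCanon_flip ((a.1 + e.1, a.2 + e.2), (b.1 + e.1, b.2 + e.2))⟩
    · exact Or.inr ⟨r, by tauto, by rw [Bool.and_comm]; exact hg, by tauto⟩
  · rintro (⟨e, he, hg, rfl⟩ | ⟨r, hr, hg, hm⟩)
    · exact Or.inl ⟨e, he, by rw [Bool.and_comm]; exact hg,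
        pvCanon_flip ((b.1 + e.1, b.2 + e.2), (a.1 + e.1, a.2 + e.2))⟩
    · exact Or.inr ⟨r, by tauto, by rw [Bool.and_comm]; exact hg, by tauto⟩

lemma pv_moves_canon (board : List (List Int)) (n : Int) (s : (Int × Int) × (Int × Int))
    (m : (Int × Int) × (Int × Int)) :
    m ∈ pvMoves board n (pvCanon s) ↔ m ∈ pvMoves board n s := by
  unfold pvCanon
  split_ifs with h
  · rfl
  · have := pv_moves_flip board n s.1 s.2 m
    simpa using this

-- pvMoves of a state is exactly the canonical image of pvNeighbors of that state
lemma pv_canon_neighbors_iff (board : List (List Int)) (n : Int) (c1 c2 : Int × Int)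
    (m : (Int × Int) × (Int × Int)) :
    (∃ m' ∈ pvNeighbors board n c1 c2, pvCanon m' = m) ↔ m ∈ pvMoves board n (c1, c2) := by
  have e1 : -(c2.2 - c1.2) = c1.2 - c2.2 := by ring
  have e2 : -(c2.1 - c1.1) = c1.1 - c2.1 := by ring
  rw [pv_mem_moves_iff]
  simp only [pvNeighbors, e1, e2, List.mem_append, List.mem_filterMap]
  constructor
  · rintro ⟨m', (⟨e, he, hfe⟩ | ⟨r, hr, hfr⟩) | ⟨r, hr, hfr⟩, rfl⟩
    · split_ifs at hfe with hg
      · obtain rfl := Option.some.inj hfe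
        exact Or.inl ⟨e, he, hg, rfl⟩
    · split_ifs at hfr with hg
      · obtain rfl := Option.some.inj hfr
        exact Or.inr ⟨r, hr, hg, Or.inl rfl⟩
    · split_ifs at hfr with hg
      · obtain rfl := Option.some.inj hfr
        refine Or.inr ⟨r, hr, hg, Or.inr ?_⟩
        exact (pvCanon_flip ((c2.1 + r.1, c2.2 + r.2), c2)).symm
  · rintro (⟨e, he, hg, rfl⟩ | ⟨r, hr, hg, hm⟩)
    · exact ⟨((c1.1 + e.1, c1.2 + e.2), (c2.1 + e.1, c2.2 + e.2)),
        Or.inl (Or.inl ⟨e, he, by rw [if_pos hg]⟩), rfl⟩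
    · rcases hm with rfl | rfl
      · exact ⟨(c1, (c1.1 + r.1, c1.2 + r.2)),
          Or.inl (Or.inr ⟨r, hr, by rw [if_pos hg]⟩), rfl⟩
      · exact ⟨((c2.1 + r.1, c2.2 + r.2), c2),
          Or.inr ⟨r, hr, by rw [if_pos hg]⟩,
          pvCanon_flip (c2, (c2.1 + r.1, c2.2 + r.2))⟩

-- ===== Part III: B's round iteration computes pvAns =====

lemma pv_roundsB_correct (board : List (List Int)) (n : Int) (hn : 2 ≤ n) :
    ∀ (k T : Nat) (R : List ((Int × Int) × (Int × Int))),
      k = 2 * n.toNat * n.toNat + 1 - T →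
      R.Nodup →
      (∀ x, x ∈ R ↔ x ∈ pvReachSet board n T) →
      (∀ j, j < T → pvGoalB board n j = false) →
      pvRoundsB board n (n - 1, n - 1) (PySem.List.pyRange (T : Int) (2 * n * n + 1) 1) R =
        pvAns board n := by
  have hnn : ((n.toNat : Int)) = n := Int.toNat_of_nonneg (by omega)
  have hcast : (2 * n * n + 1 : Int) = ((2 * n.toNat * n.toNat + 1 : Nat) : Int) := by
    push_cast [hnn]; ring
  intro k
  induction k with
  | zero =>
    intro T R hk hnd hmem hmin
    have hT : (2 * n * n + 1 : Int) ≤ (T : Int) := by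
      rw [hcast]; exact_mod_cast by omega
    rw [PySem.List.pyRange_one_eq_nil hT]
    have hno : ¬ ∃ t, pvGoalB board n t = true := by
      rintro ⟨t0, ht0⟩
      have hex : ∃ t, pvGoalB board n t = true := ⟨t0, ht0⟩
      have hK := pv_find_le board n hn hex
      have hTge : 2 * (n.toNat * n.toNat) + 1 ≤ T := by rw [← Nat.mul_assoc]; omega
      have hKT : Nat.find hex < T := by omega
      have h1 := hmin _ hKT
      have h2 := Nat.find_spec hex
      simp_all
    unfold pvRoundsB pvAns
    rw [dif_neg hno]
  | succ k ih =>
    intro T R hk hnd hmem hmin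
    have hT : (T : Int) < 2 * n * n + 1 := by
      rw [hcast]; exact_mod_cast by omega
    rw [PySem.List.pyRange_one_cons hT]
    simp only [pvRoundsB]
    have hany : (R.any (fun s => s.1 == (n - 1, n - 1) || s.2 == (n - 1, n - 1))) = true ↔
        pvGoalB board n T = true := by
      simp only [List.any_eq_true, Bool.or_eq_true, beq_iff_eq, pvGoalB, decide_eq_true_eq]
      constructor
      · rintro ⟨c, hc, hg⟩; exact ⟨c, (hmem c).mp hc, hg⟩
      · rintro ⟨c, hc, hg⟩; exact ⟨c, (hmem c).mpr hc, hg⟩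
    by_cases hgoal : pvGoalB board n T = true
    · rw [if_pos (hany.mpr hgoal)]
      have hex : ∃ t, pvGoalB board n t = true := ⟨T, hgoal⟩
      unfold pvAns
      rw [dif_pos hex]
      have : Nat.find hex = T := by
        rw [Nat.find_eq_iff]
        exact ⟨hgoal, fun k hk => by simp [hmin k hk]⟩
      rw [this]
    · rw [if_neg (by rw [hany]; exact hgoal)]
      have hbig : ∀ x, x ∈ PySem.Set.union R (PySem.Set.ofList (R.flatMap (pvMoves board n))) ↔
          x ∈ pvReachSet board n (T + 1) := by
        intro x
        rw [PySem.Set.mem_union, PySem.Set.mem_ofList, List.mem_flatMap, pv_mem_reach_succ]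
        constructor
        · rintro (hx | ⟨u, hu, hx⟩)
          · exact Or.inl ((hmem x).mp hx)
          · exact Or.inr ⟨u, (hmem u).mp hu, hx⟩
        · rintro (hx | ⟨u, hu, hx⟩)
          · exact Or.inl ((hmem x).mpr hx)
          · exact Or.inr ⟨u, (hmem u).mpr hu, hx⟩
      have hbignd : (PySem.Set.union R (PySem.Set.ofList (R.flatMap (pvMoves board n)))).Nodup :=
        PySem.Set.nodup_union _ _ hnd
      by_cases hlen : (PySem.Set.union R (PySem.Set.ofList (R.flatMap (pvMoves board n)))).length
          = R.length
      · rw [if_pos hlen]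
        -- the set did not grow: reachability is stable, so the goal is never reached
        have hsub : R.toFinset ⊆ (PySem.Set.union R
            (PySem.Set.ofList (R.flatMap (pvMoves board n)))).toFinset := by
          intro x hx
          rw [List.mem_toFinset] at *
          rw [PySem.Set.mem_union]
          exact Or.inl hx
        have hcards : (PySem.Set.union R
            (PySem.Set.ofList (R.flatMap (pvMoves board n)))).toFinset.card ≤ R.toFinset.card := by
          rw [List.toFinset_card_of_nodup hnd, List.toFinset_card_of_nodup hbignd, hlen]
        have hfeq := Finset.eq_of_subset_of_card_le hsub hcards
        have hsame : ∀ x, x ∈ PySem.Set.union R (PySem.Set.ofList (R.flatMap (pvMoves board n)))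
            ↔ x ∈ R := by
          intro x
          rw [← List.mem_toFinset, ← hfeq, List.mem_toFinset]
        have hstab0 : pvReachSet board n (T + 1) = pvReachSet board n T := by
          ext x
          rw [← hbig x, hsame x, hmem x]
        have hstab := pv_reach_stab board n T hstab0
        have hno : ¬ ∃ t, pvGoalB board n t = true := by
          rintro ⟨t0, ht0⟩
          rcases Nat.lt_or_ge t0 T with h | h
          · simp [hmin t0 h] at ht0
          · apply hgoal
            simp only [pvGoalB, decide_eq_true_eq] at ht0 ⊢
            obtain ⟨c, hc, hg⟩ := ht0
            rw [hstab t0 h] at hc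
            exact ⟨c, hc, hg⟩
        unfold pvAns
        rw [dif_neg hno]
      · rw [if_neg hlen]
        have hT1 : ((T + 1 : Nat) : Int) = (T : Int) + 1 := by push_cast; ring
        rw [← hT1]
        apply ih (T + 1) _ (by omega) hbignd hbig
        intro j hj
        rcases Nat.lt_or_ge j T with h | h
        · exact hmin j h
        · have : j = T := by omega
          subst this
          simpa using hgoal

lemma pv_B_eq_ans (board : List (List Int)) (hn : 2 ≤ board.length) :
    solution_alt board = pvAns board (board.length : Int) := by
  unfold solution_alt
  have hstart : PySem.Set.add PySem.Set.empty ((0, 0), (0, 1)) =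
      ([((0, 0), (0, 1))] : List ((Int × Int) × (Int × Int))) := by decide
  rw [hstart]
  have h0 : ((0 : Nat) : Int) = 0 := rfl
  rw [show (0 : Int) = ((0 : Nat) : Int) from rfl]
  apply pv_roundsB_correct board (board.length : Int) (by exact_mod_cast hn) _ 0
  · rfl
  · exact List.nodup_singleton _
  · intro x
    simp [pvReachSet]
  · intro j hj
    omega

-- ===== Part II: the ghost BFS machine computes pvAns =====

lemma pv_goal_canon (n : Int) (c : (Int × Int) × (Int × Int)) :
    ((pvCanon c).1 = (n - 1, n - 1) ∨ (pvCanon c).2 = (n - 1, n - 1)) ↔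
      (c.1 = (n - 1, n - 1) ∨ c.2 = (n - 1, n - 1)) := by
  unfold pvCanon
  split_ifs <;> simp [or_comm]

lemma pv_ghostLoop_nil (board : List (List Int)) (n : Int) (f : Nat)
    (V : List ((Int × Int) × (Int × Int))) : pvGhostLoop board n f [] V = 0 := by
  cases f <;> rfl

lemma pv_ghost_fold (t : Int) :
    ∀ (cands : List ((Int × Int) × (Int × Int)))
      (q : List (((Int × Int) × (Int × Int)) × Int)) (V : List ((Int × Int) × (Int × Int))),
    ∃ newQ,
      cands.foldl (pvGhostStep t) (q, V) = (q ++ newQ, V ++ newQ.map (fun e => pvCanon e.1)) ∧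
      (∀ e ∈ newQ, e.2 = t + 1 ∧ e.1 ∈ cands ∧ pvCanon e.1 ∉ V) ∧
      (newQ.map (fun e => pvCanon e.1)).Nodup ∧
      (∀ m ∈ cands, pvCanon m ∈ V ∨ pvCanon m ∈ newQ.map (fun e => pvCanon e.1)) := by
  intro cands
  induction cands with
  | nil =>
    intro q V
    exact ⟨[], by simp, by simp, by simp, by simp⟩
  | cons c cs ih =>
    intro q V
    rw [List.foldl_cons]
    by_cases hc : pvCanon c ∈ V
    · rw [show pvGhostStep t (q, V) c = (q, V) from by unfold pvGhostStep; rw [if_pos hc]]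
      obtain ⟨newQ, heq, hprops, hnd, hcov⟩ := ih q V
      refine ⟨newQ, heq, ?_, hnd, ?_⟩
      · intro e he
        obtain ⟨h1, h2, h3⟩ := hprops e he
        exact ⟨h1, List.mem_cons_of_mem _ h2, h3⟩
      · intro m hm
        rcases List.mem_cons.mp hm with rfl | hm
        · exact Or.inl hc
        · exact hcov m hm
    · rw [show pvGhostStep t (q, V) c = (q ++ [(c, t + 1)], V ++ [pvCanon c]) from by
        unfold pvGhostStep; rw [if_neg hc]]
      obtain ⟨newQ, heq, hprops, hnd, hcov⟩ := ih (q ++ [(c, t + 1)]) (V ++ [pvCanon c])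
      refine ⟨(c, t + 1) :: newQ, ?_, ?_, ?_, ?_⟩
      · rw [heq]
        simp
      · intro e he
        rcases List.mem_cons.mp he with rfl | he
        · exact ⟨rfl, List.mem_cons_self, hc⟩
        · obtain ⟨h1, h2, h3⟩ := hprops e he
          refine ⟨h1, List.mem_cons_of_mem _ h2, fun hv => h3 ?_⟩
          simp [hv]
      · rw [List.map_cons]
        refine List.Nodup.cons ?_ hnd
        intro hmem
        obtain ⟨e, he, hce⟩ := List.mem_map.mp hmem
        have := (hprops e he).2.2
        rw [hce] at this
        simp at this
      · intro m hm
        rcases List.mem_cons.mp hm with rfl | hm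
        · right
          simp
        · rcases hcov m hm with hv | hq
          · rcases List.mem_append.mp hv with hv | hv
            · exact Or.inl hv
            · right
              simp only [List.mem_singleton] at hv
              simp [hv]
          · right
            rw [List.map_cons]
            exact List.mem_cons_of_mem _ hq

lemma pv_ghost_correct (board : List (List Int)) (n : Int) (hn : 2 ≤ n) :
    ∀ (fuel : Nat) (L1 L2 : List (((Int × Int) × (Int × Int)) × Int))
      (V : List ((Int × Int) × (Int × Int))) (T : Nat),
    L1 ≠ [] →
    (∀ e ∈ L1, e.2 = (T : Int) ∧ pvCanon e.1 ∈ pvReachSet board n T ∧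
      ∀ k, k < T → pvCanon e.1 ∉ pvReachSet board n k) →
    (∀ e ∈ L2, e.2 = (T : Int) + 1 ∧ pvCanon e.1 ∈ pvReachSet board n (T + 1) ∧
      ∀ k, k < T + 1 → pvCanon e.1 ∉ pvReachSet board n k) →
    (∀ x, x ∈ V ↔ (x ∈ pvReachSet board n T ∨ x ∈ L2.map (fun e => pvCanon e.1))) →
    (∀ c ∈ pvReachSet board n T, c ∉ L1.map (fun e => pvCanon e.1) →
      ∀ m ∈ pvMoves board n c, m ∈ V) →
    (∀ c ∈ pvReachSet board n T, (c.1 = (n - 1, n - 1) ∨ c.2 = (n - 1, n - 1)) →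
      c ∈ L1.map (fun e => pvCanon e.1)) →
    ((L1 ++ L2).map (fun e => pvCanon e.1)).Nodup →
    V.Nodup →
    (L1 ++ L2).length + 2 * (n.toNat * n.toNat) < fuel + V.length →
    pvGhostLoop board n fuel (L1 ++ L2) V = pvAns board n := by
  intro fuel
  induction fuel with
  | zero =>
    intro L1 L2 V T hL1ne h1 h2 h3 h5 h6 h7 h8 hfuel
    exfalso
    have hVbox : V.toFinset ⊆ pvBoxFin n := by
      intro x hx
      rw [List.mem_toFinset] at hx
      have hx' := (h3 x).mp hx
      have hxr : x ∈ pvReachSet board n (T + 1) := by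
        rcases hx' with hx' | hx'
        · exact pv_reach_subset_succ board n T hx'
        · obtain ⟨e, he, hce⟩ := List.mem_map.mp hx'
          rw [← hce]
          exact (h2 e he).2.1
      exact pv_ok_mem_box n x (pv_reach_ok board n hn (T + 1) x hxr)
    have hVlen : V.length ≤ 2 * (n.toNat * n.toNat) := by
      calc V.length = V.toFinset.card := (List.toFinset_card_of_nodup h8).symm
        _ ≤ (pvBoxFin n).card := Finset.card_le_card hVbox
        _ ≤ 2 * (n.toNat * n.toNat) := pv_box_card n
    omega
  | succ fuel ih =>
    intro L1 L2 V T hL1ne h1 h2 h3 h5 h6 h7 h8 hfuel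
    cases L1 with
    | nil => exact absurd rfl hL1ne
    | cons hd L1' =>
    obtain ⟨c, t⟩ := hd
    obtain ⟨ht, hcT, hcmin⟩ := h1 (c, t) List.mem_cons_self
    dsimp only at ht hcT hcmin
    rw [List.cons_append]
    simp only [pvGhostLoop]
    by_cases hg : c.1 = (n - 1, n - 1) ∨ c.2 = (n - 1, n - 1)
    · rw [if_pos hg]
      have hGT : pvGoalB board n T = true := by
        simp only [pvGoalB, decide_eq_true_eq]
        exact ⟨pvCanon c, hcT, (pv_goal_canon n c).mpr hg⟩
      have hex : ∃ t0, pvGoalB board n t0 = true := ⟨T, hGT⟩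
      unfold pvAns
      rw [dif_pos hex]
      have hfind : Nat.find hex = T := by
        rw [Nat.find_eq_iff]
        refine ⟨hGT, ?_⟩
        intro j hj hGj
        simp only [pvGoalB, decide_eq_true_eq] at hGj
        obtain ⟨c', hc', hgc'⟩ := hGj
        have hc'T := pv_reach_mono board n (le_of_lt hj) hc'
        obtain ⟨e, heL1, hce⟩ := List.mem_map.mp (h6 c' hc'T hgc')
        have := (h1 e heL1).2.2 j hj
        rw [hce] at this
        exact this hc'
      rw [hfind]
      exact ht
    · rw [if_neg hg]
      obtain ⟨newQ, heq, hprops, hndnew, hcov⟩ :=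
        pv_ghost_fold t (pvNeighbors board n c.1 c.2) (L1' ++ L2) V
      simp only [heq]
      -- facts about the newly enqueued states
      have hmoves_new : ∀ e ∈ newQ, pvCanon e.1 ∈ pvMoves board n (pvCanon c) := by
        intro e he
        obtain ⟨_, hin, _⟩ := hprops e he
        have hmem : pvCanon e.1 ∈ pvMoves board n (c.1, c.2) :=
          (pv_canon_neighbors_iff board n c.1 c.2 (pvCanon e.1)).mp ⟨e.1, hin, rfl⟩
        exact (pv_moves_canon board n c (pvCanon e.1)).mpr hmem
      have hnew_reach : ∀ e ∈ newQ, pvCanon e.1 ∈ pvReachSet board n (T + 1) ∧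
          ∀ k, k < T + 1 → pvCanon e.1 ∉ pvReachSet board n k := by
        intro e he
        have hr : pvCanon e.1 ∈ pvReachSet board n (T + 1) := by
          rw [pv_mem_reach_succ]
          exact Or.inr ⟨pvCanon c, hcT, hmoves_new e he⟩
        have hnotT : pvCanon e.1 ∉ pvReachSet board n T := by
          intro hmem
          exact (hprops e he).2.2 ((h3 _).mpr (Or.inl hmem))
        refine ⟨hr, fun k hk hmem => hnotT (pv_reach_mono board n (by omega) hmem)⟩
      have hcovC : ∀ m ∈ pvMoves board n (pvCanon c),
          m ∈ V ++ newQ.map (fun e => pvCanon e.1) := by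
        intro m hm
        have hm' : m ∈ pvMoves board n c := (pv_moves_canon board n c m).mp hm
        obtain ⟨m', hm'in, hcm⟩ :=
          (pv_canon_neighbors_iff board n c.1 c.2 m).mpr hm'
        rcases hcov m' hm'in with hv | hq
        · exact List.mem_append.mpr (Or.inl (hcm ▸ hv))
        · exact List.mem_append.mpr (Or.inr (hcm ▸ hq))
      have hnewdisj : ∀ x ∈ newQ.map (fun e => pvCanon e.1), x ∉ V := by
        intro x hx hxV
        obtain ⟨e, he, hce⟩ := List.mem_map.mp hx
        exact (hprops e he).2.2 (hce ▸ hxV)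
      have hV'nodup : (V ++ newQ.map (fun e => pvCanon e.1)).Nodup :=
        List.Nodup.append h8 hndnew (fun x hxV hxN => hnewdisj x hxN hxV)
      have hrestV : ∀ e ∈ L1' ++ L2, pvCanon e.1 ∈ V := by
        intro e he
        rcases List.mem_append.mp he with he | he
        · exact (h3 _).mpr (Or.inl ((h1 e (List.mem_cons_of_mem _ he)).2.1))
        · exact (h3 _).mpr (Or.inr (List.mem_map.mpr ⟨e, he, rfl⟩))
      have h7tail : ((L1' ++ L2).map (fun e => pvCanon e.1)).Nodup := by
        rw [List.cons_append, List.map_cons] at h7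
        exact h7.of_cons
      by_cases hq0 : L1' = [] ∧ L2 = [] ∧ newQ = []
      · obtain ⟨rfl, rfl, rfl⟩ := hq0
        simp only [List.append_nil, List.map_nil]
        rw [pv_ghostLoop_nil]
        have hstab0 : pvReachSet board n (T + 1) = pvReachSet board n T := by
          ext x
          rw [pv_mem_reach_succ]
          constructor
          · rintro (hx | ⟨u, hu, hxm⟩)
            · exact hx
            · by_cases huc : u = pvCanon c
              · subst huc
                have := hcovC x hxm
                simp only [List.map_nil, List.append_nil] at this
                rcases (h3 x).mp this with h | h
                · exact h
                · simp at h
              · have hxV := h5 u hu (by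
                  simp only [List.map_cons, List.map_nil, List.mem_singleton]
                  exact huc) x hxm
                rcases (h3 x).mp hxV with h | h
                · exact h
                · simp at h
          · exact Or.inl
        have hstab := pv_reach_stab board n T hstab0
        have hno : ¬ ∃ t0, pvGoalB board n t0 = true := by
          rintro ⟨t0, ht0⟩
          simp only [pvGoalB, decide_eq_true_eq] at ht0
          obtain ⟨c', hc', hgc'⟩ := ht0
          have hc'T : c' ∈ pvReachSet board n T := by
            rcases Nat.lt_or_ge t0 T with hlt | hge
            · exact pv_reach_mono board n (le_of_lt hlt) hc'
            · rw [hstab t0 hge] at hc'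
              exact hc'
          have := h6 c' hc'T hgc'
          simp only [List.map_cons, List.map_nil, List.mem_singleton] at this
          subst this
          exact hg ((pv_goal_canon n c).mp hgc')
        unfold pvAns
        rw [dif_neg hno]
      · cases L1' with
        | cons e1 L1'' =>
          rw [show (e1 :: L1'' ++ L2) ++ newQ = (e1 :: L1'') ++ (L2 ++ newQ) by
            rw [List.append_assoc]]
          apply ih (e1 :: L1'') (L2 ++ newQ) (V ++ newQ.map (fun e => pvCanon e.1)) T
            (List.cons_ne_nil _ _)
          · intro e he
            exact h1 e (List.mem_cons_of_mem _ he)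
          · intro e he
            rcases List.mem_append.mp he with he | he
            · exact h2 e he
            · obtain ⟨hr, hmin⟩ := hnew_reach e he
              exact ⟨by rw [(hprops e he).1, ht], hr, hmin⟩
          · intro x
            rw [List.mem_append, h3 x, List.map_append, List.mem_append]
            tauto
          · intro c' hc' hnot m hm
            by_cases huc : c' = pvCanon c
            · subst huc
              exact hcovC m hm
            · refine List.mem_append.mpr (Or.inl (h5 c' hc' ?_ m hm))
              rw [List.map_cons, List.mem_cons]
              rintro (h | h)
              · exact huc h
              · exact hnot h
          · intro c' hc' hgc'
            have hmem := h6 c' hc' hgc'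
            rw [List.map_cons, List.mem_cons] at hmem
            rcases hmem with h | h
            · exfalso
              rw [h] at hgc'
              exact hg ((pv_goal_canon n c).mp hgc')
            · exact h
          · rw [show (e1 :: L1'') ++ (L2 ++ newQ) = ((e1 :: L1'') ++ L2) ++ newQ from
              (List.append_assoc _ _ _).symm]
            rw [List.map_append]
            refine List.Nodup.append h7tail hndnew ?_
            intro x hxL hxN
            obtain ⟨e, he, hce⟩ := List.mem_map.mp hxL
            exact hnewdisj x hxN (hce ▸ hrestV e he)
          · exact hV'nodup
          · simp only [List.length_append, List.length_cons, List.length_map] at hfuel ⊢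
            omega
        | nil =>
          have hne : L2 ++ newQ ≠ [] := by
            intro h
            rcases List.append_eq_nil_iff.mp h with ⟨h1', h2'⟩
            exact hq0 ⟨rfl, h1', h2'⟩
          rw [show (([] : List (((Int × Int) × (Int × Int)) × Int)) ++ L2) ++ newQ =
            (L2 ++ newQ) ++ [] by simp]
          apply ih (L2 ++ newQ) [] (V ++ newQ.map (fun e => pvCanon e.1)) (T + 1) hne
          · intro e he
            have hc1 : ((T : Int) + 1) = ((T + 1 : Nat) : Int) := by push_cast; ring
            rcases List.mem_append.mp he with he | he
            · obtain ⟨h1', h2', h3'⟩ := h2 e he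
              exact ⟨by rw [h1', hc1], h2', h3'⟩
            · obtain ⟨hr, hmin⟩ := hnew_reach e he
              exact ⟨by rw [(hprops e he).1, ht, hc1], hr, hmin⟩
          · intro e he
            simp at he
          · intro x
            simp only [List.map_nil, List.not_mem_nil, or_false]
            constructor
            · intro hx
              rcases List.mem_append.mp hx with hx | hx
              · rcases (h3 x).mp hx with h | h
                · exact pv_reach_subset_succ board n T h
                · obtain ⟨e, he, hce⟩ := List.mem_map.mp h
                  rw [← hce]
                  exact (h2 e he).2.1
              · obtain ⟨e, he, hce⟩ := List.mem_map.mp hx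
                rw [← hce]
                exact (hnew_reach e he).1
            · intro hx
              rw [pv_mem_reach_succ] at hx
              rcases hx with hx | ⟨u, hu, hxm⟩
              · exact List.mem_append.mpr (Or.inl ((h3 x).mpr (Or.inl hx)))
              · by_cases huc : u = pvCanon c
                · subst huc
                  exact hcovC x hxm
                · refine List.mem_append.mpr (Or.inl (h5 u hu ?_ x hxm))
                  simp only [List.map_cons, List.map_nil, List.mem_singleton]
                  exact huc
          · intro c' hc' hnot m hm
            have hc'V : c' ∈ V ++ newQ.map (fun e => pvCanon e.1) := by
              have hc2 := hc'
              rw [pv_mem_reach_succ] at hc2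
              rcases hc2 with hx | ⟨u, hu, hxm⟩
              · exact List.mem_append.mpr (Or.inl ((h3 c').mpr (Or.inl hx)))
              · by_cases huc : u = pvCanon c
                · subst huc
                  exact hcovC c' hxm
                · refine List.mem_append.mpr (Or.inl (h5 u hu ?_ c' hxm))
                  rw [List.map_cons]
                  simp only [List.map_nil, List.mem_singleton]
                  exact huc
            rcases List.mem_append.mp hc'V with hv | hv
            · rcases (h3 c').mp hv with h | h
              · by_cases huc : c' = pvCanon c
                · subst huc
                  exact hcovC m hm
                · exact List.mem_append.mpr (Or.inl (h5 c' h (by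
                    simp only [List.map_cons, List.map_nil, List.mem_singleton]
                    exact huc) m hm))
              · exfalso
                apply hnot
                rw [List.map_append, List.mem_append]
                exact Or.inl h
            · exfalso
              apply hnot
              rw [List.map_append, List.mem_append]
              exact Or.inr hv
          · intro c' hc' hgc'
            have hc'V : c' ∈ V ++ newQ.map (fun e => pvCanon e.1) := by
              have hc2 := hc'
              rw [pv_mem_reach_succ] at hc2
              rcases hc2 with hx | ⟨u, hu, hxm⟩
              · exact List.mem_append.mpr (Or.inl ((h3 c').mpr (Or.inl hx)))
              · by_cases huc : u = pvCanon c
                · subst huc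
                  exact hcovC c' hxm
                · refine List.mem_append.mpr (Or.inl (h5 u hu ?_ c' hxm))
                  rw [List.map_cons]
                  simp only [List.map_nil, List.mem_singleton]
                  exact huc
            rw [List.map_append, List.mem_append]
            rcases List.mem_append.mp hc'V with hv | hv
            · rcases (h3 c').mp hv with h | h
              · have hmem := h6 c' h hgc'
                rw [List.map_cons] at hmem
                simp only [List.map_nil, List.mem_singleton] at hmem
                exfalso
                rw [hmem] at hgc'
                exact hg ((pv_goal_canon n c).mp hgc')
              · exact Or.inl h
            · exact Or.inr hv
          · rw [List.append_nil, List.map_append]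
            refine List.Nodup.append ?_ hndnew ?_
            · simpa using h7tail
            · intro x hxL hxN
              obtain ⟨e, he, hce⟩ := List.mem_map.mp hxL
              refine hnewdisj x hxN (hce ▸ hrestV e ?_)
              simpa using he
          · exact hV'nodup
          · simp only [List.length_append, List.length_cons, List.length_map,
              List.length_nil] at hfuel ⊢
            omega

lemma pv_ghost_eq_ans (board : List (List Int)) (hn : 2 ≤ board.length) :
    pvGhostLoop board (board.length : Int) (4 * board.length * board.length + 4)
      [(((0, 0), (0, 1)), 0)] [((0, 0), (0, 1))] = pvAns board (board.length : Int) := by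
  have hn' : 2 ≤ (board.length : Int) := by exact_mod_cast hn
  have hcanon : pvCanon ((0, 0), (0, 1)) = (((0, 0), (0, 1)) : (Int × Int) × (Int × Int)) := by
    decide
  have := pv_ghost_correct board (board.length : Int) hn'
    (4 * board.length * board.length + 4) [(((0, 0), (0, 1)), 0)] [] [((0, 0), (0, 1))] 0
    (List.cons_ne_nil _ _)
    (by
      intro e he
      simp only [List.mem_singleton] at he
      subst he
      refine ⟨rfl, ?_, by omega⟩
      rw [hcanon]
      simp [pvReachSet])
    (by intro e he; simp at he)
    (by
      intro x
      simp [pvReachSet])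
    (by
      intro c hc hnot
      exfalso
      apply hnot
      simp only [pvReachSet, Finset.mem_singleton] at hc
      subst hc
      simp only [List.map_cons, List.map_nil, List.mem_singleton]
      exact hcanon.symm)
    (by
      intro c hc _
      simp only [pvReachSet, Finset.mem_singleton] at hc
      subst hc
      simp only [List.map_cons, List.map_nil, List.mem_singleton]
      exact hcanon.symm)
    (by simp)
    (List.nodup_singleton _)
    (by
      simp only [List.append_nil, List.length_cons, List.length_nil]
      have : ((board.length : Int)).toNat = board.length := by simp
      rw [this]
      nlinarith)
  simpa using this

-- ===== VERDICT (by name: the statement is the Claim_ definition above) =====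
theorem solution_spec : Claim_equal_solution := by
  intro board _ hpre
  unfold Spec_solution
  obtain ⟨h2, _⟩ := hpre
  rw [pv_A_eq_ghost, pv_ghost_eq_ans board h2, pv_B_eq_ans board h2]
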